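-- pv_equiv track=rewrite | github.com/linhdvu14/cp-sols | sols/CodeForces/1657_edu/C_Bracket_Sequence_Deletion.py | solve
-- ===== SOURCE A (Python) =====
-- def solve(N, S):
--     op = i = 0
--     while i < N-1:
--         if S[i] == '(':
--             op += 1
--             i += 2
--         else:
--             j = i + 1
--             while j < N and S[j] == '(': j += 1
--             if j >= N: break
--             op += 1
--             i = j + 1
--
--     return op, max(N-i, 0)
-- ===== SOURCE B (Python) =====
-- def solve(N, S):
--     # precompute nxt[k] = smallest j >= k with j >= N or S[j] != '(' (sentinel N at k = N)
--     nxt = [N]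
--     for k in range(N - 1, -1, -1):
--         nxt.append(k if S[k] != '(' else nxt[-1])
--     nxt.reverse()
--     op = i = 0
--     while i < N - 1:
--         if S[i] == '(':
--             op += 1
--             i += 2
--         else:
--             j = nxt[i + 1]
--             if j >= N:
--                 break
--             op += 1
--             i = j + 1
--     return op, max(N - i, 0)
-- ===== Notes on version B (the rewrite author's own statement) =====
-- stated objective: alternative
-- what changed: B precomputes in one right-to-left pass a table nxt[k] = first index j >= k whose character is not '(', so the main loop's inner forward scan over runs of '(' disappears and becomes a single table lookup.
-- outside the precondition, e.g. on solve(3, '(('): A returns (1, 1), B raises IndexError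
import Mathlib
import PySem

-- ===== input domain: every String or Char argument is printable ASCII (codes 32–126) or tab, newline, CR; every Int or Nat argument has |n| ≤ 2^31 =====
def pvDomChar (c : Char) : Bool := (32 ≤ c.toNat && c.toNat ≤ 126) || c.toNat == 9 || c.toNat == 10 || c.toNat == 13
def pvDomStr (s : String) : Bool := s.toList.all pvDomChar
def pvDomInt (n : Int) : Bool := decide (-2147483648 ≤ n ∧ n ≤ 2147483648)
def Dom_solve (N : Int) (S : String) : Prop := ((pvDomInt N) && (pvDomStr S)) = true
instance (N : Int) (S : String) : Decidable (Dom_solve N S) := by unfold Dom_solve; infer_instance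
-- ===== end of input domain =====

-- B replaces A's repeated inner forward scan over runs of '(' by a table nxt[k] = first index
-- j ≥ k with S[j] ≠ '(' built in one right-to-left pass (objective: alternative, same cost).

-- ===== PORT A =====
-- A's inner while: advance j while j < N and S[j] == '('
def scanA (cs : List Char) (N : Int) (j : Int) : Int :=
  if _h : j < N ∧ PySem.List.pyGet? cs j = some '(' then scanA cs N (j + 1) else j
termination_by (N - j).toNat
decreasing_by omega

-- needed by loopA's termination proof
theorem scanA_ge (cs : List Char) (N : Int) (j : Int) : j ≤ scanA cs N j := by
  fun_induction scanA cs N j with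
  | case1 j h ih => omega
  | case2 j h => omega

def loopA (cs : List Char) (N : Int) (op i : Int) : Int × Int :=
  if _h : i < N - 1 then
    match PySem.List.pyGet? cs i with
    | some c =>
      if c = '(' then loopA cs N (op + 1) (i + 2)
      else
        let j := scanA cs N (i + 1)
        if N ≤ j then (op, max (N - i) 0)
        else loopA cs N (op + 1) (j + 1)
    | none => (op, max (N - i) 0)   -- Python raises IndexError here (excluded by Pre_)
  else (op, max (N - i) 0)
termination_by (N - i).toNat
decreasing_by
  · omega
  · have := scanA_ge cs N (i + 1); omega

def solve (N : Int) (S : String) : Int × Int := loopA S.toList N 0 0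

-- ===== PORT B =====
-- nxt = [N]; for k in range(N-1,-1,-1): nxt.append(k if S[k] != '(' else nxt[-1]); nxt.reverse()
def buildNxt (cs : List Char) (N : Int) : List Int :=
  ((PySem.List.pyRange (N - 1) (-1) (-1)).foldl
    (fun nxt k =>
      nxt ++ [if PySem.List.pyGet? cs k ≠ some '(' then k else PySem.List.pyGetD nxt (-1) 0])
    [N]).reverse

-- main loop of B; fuel is only a totality guard (it never runs out when started with N.toNat)
def loopB (cs : List Char) (nxt : List Int) (N : Int) : Nat → Int → Int → Int × Int
  | 0, op, i => (op, max (N - i) 0)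
  | fuel + 1, op, i =>
    if i < N - 1 then
      match PySem.List.pyGet? cs i with
      | some c =>
        if c = '(' then loopB cs nxt N fuel (op + 1) (i + 2)
        else
          let j := PySem.List.pyGetD nxt (i + 1) 0
          if N ≤ j then (op, max (N - i) 0)
          else loopB cs nxt N fuel (op + 1) (j + 1)
      | none => (op, max (N - i) 0)   -- Python raises IndexError here (excluded by Pre_)
    else (op, max (N - i) 0)

def solve_alt (N : Int) (S : String) : Int × Int :=
  loopB S.toList (buildNxt S.toList N) N N.toNat 0 0

-- ===== PRECONDITION & SPEC =====
-- Pre_ excludes N > len(S): there the index accesses of both Pythons raise IndexError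
-- (A returns only on a few such corner inputs whose run ends before the bad access; B's
-- table pass touches every index below N and always raises there).
def Pre_solve (N : Int) (S : String) : Prop := N ≤ (S.toList.length : Int)
instance (N : Int) (S : String) : Decidable (Pre_solve N S) := by unfold Pre_solve; infer_instance
def pvWitness_solve : Int × String := (4, "()((")

def Spec_solve (N : Int) (S : String) (out : Int × Int) : Prop := out = solve_alt N S
instance (N : Int) (S : String) (out : Int × Int) : Decidable (Spec_solve N S out) := by unfold Spec_solve; infer_instance

-- ===== CLAIM (what is proved, stated in full; the proofs are below) =====
def Claim_equal_solve : Prop := ∀ (N : Int) (S : String), Dom_solve N S → Pre_solve N S → Spec_solve N S (solve N S)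

-- ===== LEMMAS AND PROOFS =====

-- the intended table: entry k of buildNxt is scanA cs N k, for 0 ≤ k ≤ N
def tabB (cs : List Char) (N : Int) (k : Int) : List Int :=
  (PySem.List.pyRange k (N + 1) 1).map (scanA cs N)

theorem pyGetD_last_eq_head_reverse (acc : List Int) :
    PySem.List.pyGetD acc (-1) 0 = PySem.List.pyGetD acc.reverse 0 0 := by
  rcases acc.eq_nil_or_concat with h | ⟨ys, y, rfl⟩
  · subst h; rfl
  · rw [List.concat_eq_append, PySem.List.pyGetD_neg_one_append_singleton]
    rw [List.reverse_append]
    simp [PySem.List.pyGetD_zero_cons]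

-- the append-built list is the reverse of the cons-built one
theorem rev_fold (cs : List Char) (l : List Int) : ∀ acc : List Int,
    (l.foldl
      (fun nxt k =>
        nxt ++ [if PySem.List.pyGet? cs k ≠ some '(' then k else PySem.List.pyGetD nxt (-1) 0])
      acc).reverse
    = l.foldl
      (fun nxt k =>
        (if PySem.List.pyGet? cs k ≠ some '(' then k else PySem.List.pyGetD nxt 0 0) :: nxt)
      acc.reverse := by
  induction l with
  | nil => intro acc; rfl
  | cons k rest ih =>
    intro acc
    rw [List.foldl_cons, List.foldl_cons, ih]
    congr 1
    rw [List.reverse_append]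
    simp [pyGetD_last_eq_head_reverse acc]

theorem scanA_eq_self (cs : List Char) (N j : Int) (h : ¬ (j < N ∧ PySem.List.pyGet? cs j = some '(')) :
    scanA cs N j = j := by
  rw [scanA]; simp [h]

theorem tabB_cons (cs : List Char) (N k : Int) (h : k < N + 1) :
    tabB cs N k = scanA cs N k :: tabB cs N (k + 1) := by
  unfold tabB
  rw [PySem.List.pyRange_one_cons h]
  simp

theorem build_fold (cs : List Char) (N : Int) (n : Nat) (hn : (n : Int) ≤ N) :
    (PySem.List.pyRange ((n : Int) - 1) (-1) (-1)).foldl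
      (fun nxt k =>
        (if PySem.List.pyGet? cs k ≠ some '(' then k else PySem.List.pyGetD nxt 0 0) :: nxt)
      (tabB cs N n) = tabB cs N 0 := by
  induction n with
  | zero =>
    rw [PySem.List.pyRange_neg_one_eq_nil (by norm_num)]
    simp
  | succ n ih =>
    have h1 : ((n : Int) + 1 - 1) = (n : Int) := by ring
    have hcons : PySem.List.pyRange ((n : Int)) (-1) (-1) = (n : Int) :: PySem.List.pyRange ((n : Int) - 1) (-1) (-1) :=
      PySem.List.pyRange_neg_one_cons (by omega)
    push_cast
    rw [h1, hcons]
    have hstep :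
        ((if PySem.List.pyGet? cs (n : Int) ≠ some '(' then (n : Int)
          else PySem.List.pyGetD (tabB cs N ((n : Int) + 1)) 0 0) :: tabB cs N ((n : Int) + 1))
        = tabB cs N (n : Int) := by
      rw [tabB_cons cs N (n : Int) (by omega)]
      congr 1
      by_cases hc : PySem.List.pyGet? cs (n : Int) = some '('
      · simp only [hc]
        simp only [ne_eq, not_true_eq_false, if_false]
        rw [scanA]
        simp only [show ((n : Int) < N ∧ PySem.List.pyGet? cs (n : Int) = some '(') from ⟨by omega, hc⟩]
        by_cases hend : (n : Int) + 1 < N + 1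
        · rw [tabB_cons cs N ((n : Int) + 1) hend]
          simp [PySem.List.pyGetD]
        · have : (n : Int) + 1 = N := by omega
          rw [this, tabB_cons cs N N (by omega)]
          simp [PySem.List.pyGetD]
      · rw [scanA_eq_self cs N (n : Int) (by tauto)]
        simp only [ne_eq, hc, not_false_eq_true, if_true]
    simp only [List.foldl_cons]
    rw [hstep]
    exact ih (by omega)

theorem buildNxt_eq (cs : List Char) (N : Int) (hN : 0 ≤ N) :
    buildNxt cs N = tabB cs N 0 := by
  have h0 : tabB cs N N = [N] := by
    rw [tabB_cons cs N N (by omega)]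
    rw [scanA_eq_self cs N N (by omega)]
    unfold tabB
    rw [PySem.List.pyRange_one_eq_nil (by omega)]
    simp
  have := build_fold cs N N.toNat (by omega)
  unfold buildNxt
  rw [rev_fold]
  simp only [List.reverse_singleton]
  rw [show ((N.toNat : Int)) = N from by omega] at this
  rw [show tabB cs N (N : Int) = [N] from h0] at this
  · exact this

theorem buildNxt_get (cs : List Char) (N t : Int) (h0 : 0 ≤ t) (h1 : t ≤ N) :
    PySem.List.pyGetD (buildNxt cs N) t 0 = scanA cs N t := by
  rw [buildNxt_eq cs N (by omega)]
  unfold tabB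
  exact PySem.List.pyGetD_map_pyRange_of_nonneg _ _ _ _ h0 (by omega)

theorem loop_eq (cs : List Char) (N : Int) :
    ∀ (fuel : Nat) (op i : Int), 0 ≤ i → (N - i).toNat ≤ fuel →
      loopB cs (buildNxt cs N) N fuel op i = loopA cs N op i := by
  intro fuel
  induction fuel with
  | zero =>
    intro op i _ hf
    rw [loopA]
    have : ¬ i < N - 1 := by omega
    simp [loopB, this]
  | succ fuel ih =>
    intro op i hi hf
    rw [loopA, loopB]
    by_cases hlt : i < N - 1
    · simp only [hlt, if_true, dif_pos]
      cases hc : PySem.List.pyGet? cs i with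
      | none => rfl
      | some c =>
        by_cases hpar : c = '('
        · simp only [hpar, if_true]
          exact ih (op + 1) (i + 2) (by omega) (by omega)
        · simp only [hpar, if_false]
          rw [buildNxt_get cs N (i + 1) (by omega) (by omega)]
          by_cases hend : N ≤ scanA cs N (i + 1)
          · simp [hend]
          · simp only [hend, if_false]
            have hge := scanA_ge cs N (i + 1)
            exact ih (op + 1) (scanA cs N (i + 1) + 1) (by omega) (by omega)
    · simp [hlt]

-- ===== VERDICT (by name: the statement is the Claim_ definition above) =====
theorem solve_spec : Claim_equal_solve := by
  intro N S _dom _pre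
  unfold Spec_solve solve solve_alt
  exact (loop_eq S.toList N N.toNat 0 0 (by omega) (by omega)).symm
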